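-- pv_equiv track=rewrite | github.com/Hien1725/AdventOfCode2023 | day 13/day13.py | find_pattern_indices
-- ===== SOURCE A (Python) =====
-- def find_pattern_indices(data):
--     """
--     Find the indices of patterns in the given data.
--
--     Args:
--         data (list): List of strings representing the input data.
--
--     Returns:
--         list: A list of tuples representing the start and end indices of patterns in the data.
--     """
--     indexes_of_patterns = []
--     first = 0
--     for index, line in enumerate(data):
--         if line == '\n':
--             last = index - 1
--             indexes_of_patterns.append((first, last + 1))
--             first = index + 1
--     indexes_of_patterns.append((first, len(data)))
--
--     return indexes_of_patterns
-- ===== SOURCE B (Python) =====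
-- def find_pattern_indices(data):
--     blanks = [i for i, line in enumerate(data) if line == '\n']
--     bounds = [-1] + blanks + [len(data)]
--     return [(a + 1, b) for a, b in zip(bounds, bounds[1:])]
-- ===== Notes on version B (the rewrite author's own statement) =====
-- stated objective: simpler
-- what changed: Replaces the stateful first/last accumulator sweep by building a sentinel-padded list of blank-line indices and pairing consecutive boundaries with zip.
import Mathlib
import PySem

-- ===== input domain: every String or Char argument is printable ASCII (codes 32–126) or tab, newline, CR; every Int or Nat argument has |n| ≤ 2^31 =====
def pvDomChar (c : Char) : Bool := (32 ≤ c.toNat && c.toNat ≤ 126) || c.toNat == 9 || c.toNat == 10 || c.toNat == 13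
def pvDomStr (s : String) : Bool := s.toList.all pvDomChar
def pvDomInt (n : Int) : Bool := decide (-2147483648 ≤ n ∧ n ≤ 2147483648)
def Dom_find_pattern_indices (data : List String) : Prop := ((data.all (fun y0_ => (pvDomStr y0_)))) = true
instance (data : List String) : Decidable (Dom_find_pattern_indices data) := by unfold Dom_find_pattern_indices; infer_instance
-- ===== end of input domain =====

-- B replaces A's stateful first/last accumulator sweep by a sentinel-padded
-- boundary list of blank-line indices paired consecutively (objective: simpler).


-- ===== PORT A =====
def find_pattern_indices (data : List String) : List (Int × Int) :=
  let st := (PySem.List.enumerate data).foldl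
    (fun (st : List (Int × Int) × Int) (p : Int × String) =>
      if p.2 = "\n" then (st.1 ++ [(st.2, (p.1 - 1) + 1)], p.1 + 1) else st)
    ([], 0)
  st.1 ++ [(st.2, (data.length : Int))]

-- ===== PORT B =====
def find_pattern_indices_alt (data : List String) : List (Int × Int) :=
  let blanks := (PySem.List.enumerate data).filterMap
    (fun p => if p.2 = "\n" then some p.1 else none)
  let bounds := ((-1 : Int) :: blanks) ++ [(data.length : Int)]
  (bounds.zip (bounds.drop 1)).map (fun p => (p.1 + 1, p.2))

-- ===== PRECONDITION & SPEC =====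
def Spec_find_pattern_indices (data : List String) (out : List (Int × Int)) : Prop := out = find_pattern_indices_alt data
instance (data : List String) (out : List (Int × Int)) : Decidable (Spec_find_pattern_indices data out) := by unfold Spec_find_pattern_indices; infer_instance

-- ===== CLAIM (what is proved, stated in full; the proofs are below) =====
def Claim_equal_find_pattern_indices : Prop := ∀ (data : List String), Dom_find_pattern_indices data → Spec_find_pattern_indices data (find_pattern_indices data)

-- ===== LEMMAS AND PROOFS =====

/-- Consecutive pairing `(a+1, b)` of a boundary list, the recursive form of
B's `zip bounds (drop 1 bounds)` comprehension. -/
def pvPairs : List Int → List (Int × Int)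
  | a :: b :: rest => (a + 1, b) :: pvPairs (b :: rest)
  | _ => []

theorem pvPairs_eq_zip (l : List Int) :
    (l.zip (l.drop 1)).map (fun p => (p.1 + 1, p.2)) = pvPairs l := by
  match l with
  | [] => rfl
  | [a] => rfl
  | a :: b :: rest =>
    simp only [List.drop_succ_cons, List.drop_zero, List.zip_cons_cons, List.map_cons, pvPairs]
    exact congrArg _ (pvPairs_eq_zip (b :: rest))

/-- Invariant of A's fold: with accumulator `acc` and current block start `first`,
finishing the fold and appending the trailing pair equals `acc` followed by the
consecutive pairing of `(first - 1)`, the blank indices, and the endpoint `e`. -/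
theorem pvFold_inv (xs : List String) (s : Int) (acc : List (Int × Int)) (first e : Int) :
    (let r := (PySem.List.enumerate xs s).foldl
        (fun (st : List (Int × Int) × Int) (p : Int × String) =>
          if p.2 = "\n" then (st.1 ++ [(st.2, (p.1 - 1) + 1)], p.1 + 1) else st)
        (acc, first)
     r.1 ++ [(r.2, e)])
    = acc ++ pvPairs ((first - 1) ::
        (PySem.List.enumerate xs s).filterMap
          (fun p => if p.2 = "\n" then some p.1 else none) ++ [e]) := by
  induction xs generalizing s acc first with
  | nil => simp [PySem.List.enumerate_nil, pvPairs]
  | cons x xs ih =>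
    simp only [PySem.List.enumerate_cons, List.foldl_cons, List.filterMap_cons]
    by_cases hx : x = "\n"
    · simp only [hx, if_pos]
      rw [ih (s+1) (acc ++ [(first, s - 1 + 1)]) (s+1)]
      simp only [pvPairs, List.cons_append]
      rw [show (s:Int) - 1 + 1 = s from by ring, show (s:Int) + 1 - 1 = s from by ring,
          show first - 1 + 1 = first from by ring]
      simp
    · simp only [if_neg hx]
      exact ih (s+1) acc first

-- ===== VERDICT (by name: the statement is the Claim_ definition above) =====
theorem find_pattern_indices_spec : Claim_equal_find_pattern_indices := by
  intro data _
  show find_pattern_indices data = find_pattern_indices_alt data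
  unfold find_pattern_indices find_pattern_indices_alt
  rw [pvPairs_eq_zip]
  have h := pvFold_inv data 0 [] 0 (data.length : Int)
  simpa using h
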